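-- pv_equiv track=rewrite | github.com/sunilgitb/DSAlgo-Python | 07_Graph/03. All Paths From Source to Target.py | allPathsSourceTargetBacktrack
-- ===== SOURCE A (Python) =====
-- from typing import List
--
-- def allPathsSourceTargetBacktrack(graph: List[List[int]]) -> List[List[int]]:
--     """
--     Alternative implementation using backtracking (modifying path in place)
--     """
--     n = len(graph)
--     result = []
--     path = []
--
--     def backtrack(node):
--         path.append(node)
--
--         if node == n - 1:
--             result.append(path[:])  # Make a copy
--         else:
--             for neighbor in graph[node]:
--                 backtrack(neighbor)
--
--         path.pop()  # Backtrack
--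
--     backtrack(0)
--     return result
-- ===== SOURCE B (Python) =====
-- from typing import List
--
-- def allPathsSourceTargetBacktrack(graph: List[List[int]]) -> List[List[int]]:
--     n = len(graph)
--     result = []
--     stack = [[0]]
--     while stack:
--         path = stack.pop()
--         node = path[-1]
--         if node == n - 1:
--             result.append(path)
--         else:
--             for neighbor in reversed(graph[node]):
--                 stack.append(path + [neighbor])
--     return result
-- ===== Notes on version B (the rewrite author's own statement) =====
-- stated objective: alternative
-- what changed: Replaced the recursive backtracking over a shared mutated path (append/recurse/pop with a closure) by a non-recursive worklist loop: an explicit stack of complete partial paths, popping one path per iteration and pushing its extensions (neighbors reversed to keep A's DFS output order).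
import Mathlib
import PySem

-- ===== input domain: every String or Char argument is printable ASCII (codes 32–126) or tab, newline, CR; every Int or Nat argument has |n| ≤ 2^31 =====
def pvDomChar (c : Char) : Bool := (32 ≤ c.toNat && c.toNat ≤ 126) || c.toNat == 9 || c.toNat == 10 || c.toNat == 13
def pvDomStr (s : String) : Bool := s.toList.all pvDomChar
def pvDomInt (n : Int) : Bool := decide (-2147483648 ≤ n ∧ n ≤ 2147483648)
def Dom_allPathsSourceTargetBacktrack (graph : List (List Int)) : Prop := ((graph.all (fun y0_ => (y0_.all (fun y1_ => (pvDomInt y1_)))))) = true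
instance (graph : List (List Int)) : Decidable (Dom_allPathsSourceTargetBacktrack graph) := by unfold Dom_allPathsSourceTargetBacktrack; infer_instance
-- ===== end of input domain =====

-- B replaces A's recursive backtracking over a shared mutated path by a non-recursive worklist
-- loop over an explicit stack of partial paths (neighbors pushed reversed to keep A's output
-- order); objective: alternative decomposition, same cost.

-- Depth bound shared by both ports' termination scaffolding: under Pre_ the node values on any
-- DFS path are pairwise distinct, all being 0 or neighbor values, so DFS depth is below this.
def pvDepth (graph : List (List Int)) : Nat := graph.length + (graph.flatMap id).length + 1

-- ===== PORT A =====
-- A's recursive `backtrack` with the mutated `path` and `result` carried as explicit state.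
def pvBtA (graph : List (List Int)) : Nat → Int → List Int → List (List Int) → List (List Int)
  | 0, _, _, res => res
  | f + 1, node, path, res =>
    let path' := path ++ [node]                     -- path.append(node)
    if node = (graph.length : Int) - 1 then
      res ++ [path']                                -- result.append(path[:])
    else
      -- for neighbor in graph[node]: backtrack(neighbor)
      -- pyGet? is Python's graph[node] (negative wrap; none = IndexError, excluded by Pre_)
      ((PySem.List.pyGet? graph node).getD []).foldl (fun r nb => pvBtA graph f nb path' r) res
    -- path.pop(): path is restored, which the explicit-state form needs no step for

def allPathsSourceTargetBacktrack (graph : List (List Int)) : List (List Int) :=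
  pvBtA graph (pvDepth graph) 0 [] []

-- ===== PORT B =====
-- path[-1]; every path on B's stack is nonempty, so the default is never used.
def pvLast (p : List Int) : Int := (PySem.List.pyGet? p (-1)).getD 0
-- Largest adjacency-list length; bounds the branching of the worklist loop.
def pvW (graph : List (List Int)) : Nat := graph.foldl (fun m l => max m l.length) 0
-- Total loop fuel: the worklist loop pops one entry per iteration; a DFS tree of depth
-- ≤ pvDepth and branching ≤ pvW has at most this many nodes.
def pvFuelB (graph : List (List Int)) : Nat := (pvW graph + 2) ^ (pvDepth graph)

-- Source B's `while stack:` loop. The stack is stored TOP-FIRST (Lean head = Python end), so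
-- Python's pop() is a head match and pushing reversed(graph[node]) one by one at the end is
-- consing graph[node] in order at the front. Each entry carries a remaining-depth counter,
-- pure termination scaffolding: under Pre_ the depth guard `| 0 =>` is never reached.
def pvLoopB (graph : List (List Int)) : Nat → List (Nat × List Int) → List (List Int) → List (List Int)
  | 0, _, res => res
  | _ + 1, [], res => res
  | F + 1, (f, path) :: stack, res =>
    let node := pvLast path                         -- node = path[-1]
    if node = (graph.length : Int) - 1 then
      pvLoopB graph F stack (res ++ [path])         -- result.append(path)
    else
      match f with
      | 0 => pvLoopB graph F stack res              -- depth guard (never hit under Pre_)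
      | f + 1 =>
        -- for neighbor in reversed(graph[node]): stack.append(path + [neighbor])
        pvLoopB graph F
          ((((PySem.List.pyGet? graph node).getD []).map (fun nb => (f, path ++ [nb]))) ++ stack)
          res

def allPathsSourceTargetBacktrack_alt (graph : List (List Int)) : List (List Int) :=
  pvLoopB graph (pvFuelB graph) [(pvDepth graph - 1, [0])] []

-- ===== PRECONDITION & SPEC =====
-- Neighbors of a node value under Python's indexing; the target node is never expanded by A.
def pvNbrs (graph : List (List Int)) (v : Int) : List Int :=
  if v = (graph.length : Int) - 1 then [] else (PySem.List.pyGet? graph v).getD []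
-- One closure step of reachability, and the reachable set from S (the closure is reached within
-- pvDepth steps since each step either adds a new value from the finite neighbor universe or fixes).
def pvStep (graph : List (List Int)) (S : List Int) : List Int :=
  (S ++ S.flatMap (pvNbrs graph)).dedup
def pvReachFrom (graph : List (List Int)) (S : List Int) : List Int :=
  (pvStep graph)^[pvDepth graph] S
-- Pre_ is exactly where Python A returns: the graph is nonempty (A reads graph[0]), every node
-- value reachable from 0 is the target or a valid (possibly negative, Python-wrapped) index, and
-- no reachable node lies on a cycle (otherwise A raises IndexError or recurses forever).
def Pre_allPathsSourceTargetBacktrack (graph : List (List Int)) : Prop :=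
  graph ≠ [] ∧ ∀ v ∈ pvReachFrom graph [0],
    (v = (graph.length : Int) - 1 ∨ (PySem.List.pyGet? graph v).isSome = true) ∧
    v ∉ pvReachFrom graph (pvNbrs graph v)
instance (graph : List (List Int)) : Decidable (Pre_allPathsSourceTargetBacktrack graph) := by
  unfold Pre_allPathsSourceTargetBacktrack; infer_instance
def pvWitness_allPathsSourceTargetBacktrack : List (List Int) := [[1, 2], [2], []]
def Spec_allPathsSourceTargetBacktrack (graph : List (List Int)) (out : List (List Int)) : Prop := out = allPathsSourceTargetBacktrack_alt graph
instance (graph : List (List Int)) (out : List (List Int)) : Decidable (Spec_allPathsSourceTargetBacktrack graph out) := by unfold Spec_allPathsSourceTargetBacktrack; infer_instance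

-- ===== CLAIM (what is proved, stated in full; the proofs are below) =====
def Claim_equal_allPathsSourceTargetBacktrack : Prop := ∀ (graph : List (List Int)), Dom_allPathsSourceTargetBacktrack graph → Pre_allPathsSourceTargetBacktrack graph → Spec_allPathsSourceTargetBacktrack graph (allPathsSourceTargetBacktrack graph)

-- ===== LEMMAS AND PROOFS =====
-- Common reference: the pure list of paths from v to the target within depth fuel f.
def pvP (graph : List (List Int)) : Nat → Int → List (List Int)
  | 0, _ => []
  | f + 1, v =>
    if v = (graph.length : Int) - 1 then [[v]]
    else ((PySem.List.pyGet? graph v).getD []).flatMap (fun nb => (pvP graph f nb).map (v :: ·))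

-- Loop-fuel cost of one stack entry (number of pops it and its descendants consume).
def pvT (graph : List (List Int)) : Nat → Int → Nat
  | 0, _ => 1
  | f + 1, v =>
    if v = (graph.length : Int) - 1 then 1
    else 1 + (((PySem.List.pyGet? graph v).getD []).map (pvT graph f)).sum

theorem pvT_pos (graph : List (List Int)) (f : Nat) (v : Int) : 1 ≤ pvT graph f v := by
  cases f
  · simp [pvT]
  · unfold pvT; split <;> omega

-- A's explicit-state backtracking equals "previous results ++ pvP's paths, each prefixed by path".
theorem pvBtA_eq_pvP (graph : List (List Int)) :
    ∀ (f : Nat) (node : Int) (path : List Int) (res : List (List Int)),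
      pvBtA graph f node path res = res ++ (pvP graph f node).map (path ++ ·) := by
  intro f
  induction f with
  | zero => intro node path res; simp [pvBtA, pvP]
  | succ f ih =>
    intro node path res
    by_cases h : node = (graph.length : Int) - 1
    · simp [pvBtA, pvP, h]
    · simp only [pvBtA, pvP, if_neg h]
      suffices haux : ∀ (L : List Int) (res : List (List Int)),
          L.foldl (fun r nb => pvBtA graph f nb (path ++ [node]) r) res =
          res ++ (L.flatMap (fun nb => (pvP graph f nb).map (node :: ·))).map (path ++ ·) by
        simpa using haux ((PySem.List.pyGet? graph node).getD []) res
      intro L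
      induction L with
      | nil => intro res; simp
      | cons nb L ihL =>
        intro res
        simp only [List.foldl_cons, ih nb (path ++ [node]), List.flatMap_cons, List.map_append,
          ihL, List.append_assoc]
        simp [Function.comp_def]

theorem le_pvW (graph : List (List Int)) (v : Int) :
    ((PySem.List.pyGet? graph v).getD []).length ≤ pvW graph := by
  have hmono : ∀ (L : List (List Int)) (a : Nat),
      a ≤ L.foldl (fun m l => max m l.length) a := by
    intro L
    induction L with
    | nil => intro a; simp
    | cons x L ihL => intro a; exact le_trans (le_max_left _ _) (ihL (max a x.length))
  have hmem : ∀ (L : List (List Int)) (l : List Int) (a : Nat), l ∈ L →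
      l.length ≤ L.foldl (fun m l => max m l.length) a := by
    intro L
    induction L with
    | nil => intro l a h; cases h
    | cons x L ihL =>
      intro l a h
      rcases List.mem_cons.mp h with h | h
      · subst h; exact le_trans (le_max_right _ _) (hmono L (max a l.length))
      · exact ihL l _ h
  cases hg : PySem.List.pyGet? graph v with
  | none => simp
  | some l =>
    simpa using hmem graph l 0 (PySem.List.mem_of_pyGet?_eq_some graph hg)

theorem sum_map_le (g : Int → Nat) (M : Nat) (L : List Int) (h : ∀ x ∈ L, g x ≤ M) :
    (L.map g).sum ≤ L.length * M := by
  induction L with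
  | nil => simp
  | cons x L ihL =>
    simp only [List.map_cons, List.sum_cons, List.length_cons]
    have := ihL (fun y hy => h y (List.mem_cons_of_mem _ hy))
    have := h x (List.mem_cons_self)
    calc g x + (L.map g).sum ≤ M + L.length * M := by omega
      _ = (L.length + 1) * M := by ring

theorem pvT_le (graph : List (List Int)) : ∀ (f : Nat) (v : Int),
    pvT graph f v ≤ (pvW graph + 2) ^ f := by
  intro f
  induction f with
  | zero => intro v; simp [pvT]
  | succ f ih =>
    intro v
    unfold pvT
    have hp : 1 ≤ (pvW graph + 2) ^ f := Nat.one_le_pow _ _ (by omega)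
    split
    · calc 1 ≤ (pvW graph + 2) ^ f := hp
        _ ≤ (pvW graph + 2) ^ (f + 1) := Nat.pow_le_pow_right (by omega) (by omega)
    · have hsum : (((PySem.List.pyGet? graph v).getD []).map (pvT graph f)).sum
          ≤ pvW graph * (pvW graph + 2) ^ f := by
        calc (((PySem.List.pyGet? graph v).getD []).map (pvT graph f)).sum
            ≤ ((PySem.List.pyGet? graph v).getD []).length * (pvW graph + 2) ^ f :=
              sum_map_le _ _ _ (fun x _ => ih x)
          _ ≤ pvW graph * (pvW graph + 2) ^ f :=
              Nat.mul_le_mul_right _ (le_pvW graph v)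
      have : (pvW graph + 2) ^ (f + 1) = (pvW graph + 2) * (pvW graph + 2) ^ f := pow_succ'
        (pvW graph + 2) f
      nlinarith [hp, hsum]

theorem pvLast_concat (p : List Int) (x : Int) : pvLast (p ++ [x]) = x := by
  simp [pvLast, PySem.List.pyGet?_neg_one]

-- The worklist-loop invariant: with enough fuel, the loop emits, in order, the pvP paths of
-- every stack entry prefixed by that entry's path-so-far.
theorem pvLoopB_inv (graph : List (List Int)) :
    ∀ (F : Nat) (stack : List (Nat × List Int)) (res : List (List Int)),
      (∀ e ∈ stack, e.2 ≠ []) →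
      (stack.map (fun e => pvT graph e.1 (pvLast e.2))).sum ≤ F →
      pvLoopB graph F stack res =
        res ++ stack.flatMap (fun e => (pvP graph (e.1 + 1) (pvLast e.2)).map (e.2.dropLast ++ ·)) := by
  intro F
  induction F with
  | zero =>
    intro stack res hne hF
    cases stack with
    | nil => simp [pvLoopB]
    | cons e stack =>
      exfalso
      have := pvT_pos graph e.1 (pvLast e.2)
      simp only [List.map_cons, List.sum_cons] at hF
      omega
  | succ F ih =>
    intro stack res hne hF
    cases stack with
    | nil => simp [pvLoopB]
    | cons e stack =>
      obtain ⟨f, path⟩ := e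
      have hpne : path ≠ [] := hne (f, path) (List.mem_cons_self)
      have hpath : path.dropLast ++ [pvLast path] = path := by
        have : path.getLast? = some (path.getLast hpne) := List.getLast?_eq_some_getLast hpne
        simp [pvLast, PySem.List.pyGet?_neg_one, this, List.dropLast_append_getLast]
      simp only [List.map_cons, List.sum_cons] at hF
      by_cases h : pvLast path = (graph.length : Int) - 1
      · have hT : 1 ≤ pvT graph f (pvLast path) := pvT_pos graph f (pvLast path)
        simp only [pvLoopB, if_pos h]
        rw [ih stack (res ++ [path]) (fun e he => hne e (List.mem_cons_of_mem _ he)) (by omega)]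
        have hP : pvP graph (f + 1) (pvLast path) = [[pvLast path]] := by
          unfold pvP; rw [if_pos h]
        simp [hP, hpath]
      · cases f with
        | zero =>
          have hT : 1 ≤ pvT graph 0 (pvLast path) := pvT_pos graph 0 (pvLast path)
          simp only [pvLoopB, if_neg h]
          rw [ih stack res (fun e he => hne e (List.mem_cons_of_mem _ he)) (by omega)]
          have hP : pvP graph 1 (pvLast path) = [] := by
            unfold pvP; rw [if_neg h]; simp [pvP]
          simp [hP]
        | succ f =>
          have hT : pvT graph (f + 1) (pvLast path)
              = 1 + (((PySem.List.pyGet? graph (pvLast path)).getD []).map (pvT graph f)).sum := by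
            unfold pvT; rw [if_neg h]
          simp only [pvLoopB, if_neg h]
          set L := (PySem.List.pyGet? graph (pvLast path)).getD [] with hL
          have hne' : ∀ e ∈ (L.map (fun nb => (f, path ++ [nb]))) ++ stack, e.2 ≠ [] := by
            intro e he
            rcases List.mem_append.mp he with he | he
            · obtain ⟨nb, _, rfl⟩ := List.mem_map.mp he; simp
            · exact hne e (List.mem_cons_of_mem _ he)
          have hcost : ((((L.map (fun nb => (f, path ++ [nb]))) ++ stack)).map
              (fun e => pvT graph e.1 (pvLast e.2))).sum ≤ F := by
            rw [List.map_append, List.sum_append, List.map_map]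
            have : (L.map ((fun e => pvT graph e.1 (pvLast e.2)) ∘ (fun nb => (f, path ++ [nb]))))
                = L.map (pvT graph f) := by
              apply List.map_congr_left; intro nb _; simp [Function.comp, pvLast_concat]
            rw [this]; omega
          rw [ih _ res hne' hcost]
          have hP : pvP graph (f + 1 + 1) (pvLast path)
              = L.flatMap (fun nb => (pvP graph (f + 1) nb).map (pvLast path :: ·)) := by
            conv_lhs => unfold pvP
            rw [if_neg h]
          have hfun : ∀ x : List Int, path.dropLast ++ pvLast path :: x = path ++ x := by
            intro x
            conv_rhs => rw [← hpath]
            simp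
          simp only [List.flatMap_cons, List.flatMap_append, hP, List.map_flatMap,
            List.flatMap_map, List.map_map, pvLast_concat, List.dropLast_concat]
          simp [Function.comp_def, hfun]

-- ===== VERDICT (by name: the statement is the Claim_ definition above) =====
theorem allPathsSourceTargetBacktrack_spec : Claim_equal_allPathsSourceTargetBacktrack := by
  intro graph _ _
  unfold Spec_allPathsSourceTargetBacktrack allPathsSourceTargetBacktrack allPathsSourceTargetBacktrack_alt
  have hd : pvDepth graph - 1 + 1 = pvDepth graph := by unfold pvDepth; omega
  have hlast : pvLast [0] = 0 := by simp [pvLast, PySem.List.pyGet?_neg_one]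
  have hfuel : ([( (pvDepth graph - 1 : Nat), ([0] : List Int))].map
      (fun e => pvT graph e.1 (pvLast e.2))).sum ≤ pvFuelB graph := by
    simp only [List.map_cons, List.map_nil, List.sum_cons, List.sum_nil, hlast]
    calc pvT graph (pvDepth graph - 1) 0 + 0
        ≤ (pvW graph + 2) ^ (pvDepth graph - 1) := by
          simpa using pvT_le graph (pvDepth graph - 1) 0
      _ ≤ pvFuelB graph := Nat.pow_le_pow_right (by omega) (by omega)
  rw [pvBtA_eq_pvP graph (pvDepth graph) 0 [] [],
    pvLoopB_inv graph (pvFuelB graph) _ [] (by simp) hfuel]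
  simp [hd, hlast]
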